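-- pv_equiv track=rewrite | github.com/SpicyKitten/Text-Injector | main.py | indent_size
-- ===== SOURCE A (Python) =====
-- config = {
--     'SOURCE_FOLDER': 'sources',
--     'SNIPPET_FOLDER': 'snippets',
--     'OUTPUT_FOLDER': 'augmented',
--     'SOURCE_PREFIX': 'src_',
--     'SNIPPET_PREFIX': 's',
--     'INDENT_SIZE': 4,
--     'TAB_SIZE': 8,
--     'MAX_INJECTIONS_PERFORMED': 3
-- }
--
-- def indent_size(line):
--     assert isinstance(line, str)
--     size = 0
--     for character in line:
--         if character == ' ':
--             size += 1
--         elif character == '\t':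
--             size += config['TAB_SIZE']
--         else:
--             break
--     return size
-- ===== SOURCE B (Python) =====
-- config = {
--     'SOURCE_FOLDER': 'sources',
--     'SNIPPET_FOLDER': 'snippets',
--     'OUTPUT_FOLDER': 'augmented',
--     'SOURCE_PREFIX': 'src_',
--     'SNIPPET_PREFIX': 's',
--     'INDENT_SIZE': 4,
--     'TAB_SIZE': 8,
--     'MAX_INJECTIONS_PERFORMED': 3
-- }
--
-- def indent_size(line):
--     assert isinstance(line, str)
--     prefix = line[:len(line) - len(line.lstrip(' \t'))]
--     return prefix.count(' ') + prefix.count('\t') * config['TAB_SIZE']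
-- ===== Notes on version B (the rewrite author's own statement) =====
-- stated objective: simpler
-- what changed: Replaced A's accumulating per-character loop with break by stripping the ' '/'\t' prefix via lstrip, slicing that prefix off by length, and summing prefix.count(' ') + prefix.count('\t')*TAB_SIZE.
import Mathlib
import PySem

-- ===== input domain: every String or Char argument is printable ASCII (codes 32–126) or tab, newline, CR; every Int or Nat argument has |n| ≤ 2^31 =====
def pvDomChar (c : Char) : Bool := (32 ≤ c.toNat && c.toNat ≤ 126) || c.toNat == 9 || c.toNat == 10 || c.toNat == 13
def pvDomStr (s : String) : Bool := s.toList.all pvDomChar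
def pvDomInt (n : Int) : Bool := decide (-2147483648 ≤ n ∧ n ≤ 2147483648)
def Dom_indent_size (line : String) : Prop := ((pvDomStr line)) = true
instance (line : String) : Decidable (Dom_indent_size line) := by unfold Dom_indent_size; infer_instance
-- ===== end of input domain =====

-- B replaces A's accumulating char loop (with break) by a library-style decomposition:
-- strip the ' '/'\t' prefix off, recover that prefix by length, and count spaces and tabs
-- in it separately (objective: simpler; same behaviour on all str inputs).

-- ===== PORT A =====
-- 'for character in line: … else: break' as structural recursion over the chars, same state 'size'
def indentLoopA : List Char → Int → Int
  | [], size => size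
  | c :: rest, size =>
    if c = ' ' then indentLoopA rest (size + 1)
    else if c = '\t' then indentLoopA rest (size + 8)   -- config['TAB_SIZE'] = 8
    else size                                           -- break

def indent_size (line : String) : Int :=
  indentLoopA line.toList 0

-- ===== PORT B =====
def indent_size_alt (line : String) : Int :=
  let cs := line.toList
  -- line.lstrip(' \t'): drop the longest prefix of ' '/'\t' chars (exact, hand-ported: no PySem lstrip-with-chars primitive)
  let stripped := cs.dropWhile (fun c => c == ' ' || c == '\t')
  -- line[:len(line) - len(stripped)]: a take of a nonnegative in-range bound
  let pre := cs.take (cs.length - stripped.length)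
  -- pre.count(' ') + pre.count('\t') * config['TAB_SIZE']
  (pre.count ' ' : Int) + (pre.count '\t') * 8

-- ===== PRECONDITION & SPEC =====
def Spec_indent_size (line : String) (out : Int) : Prop := out = indent_size_alt line
instance (line : String) (out : Int) : Decidable (Spec_indent_size line out) := by unfold Spec_indent_size; infer_instance

-- ===== CLAIM (what is proved, stated in full; the proofs are below) =====
def Claim_equal_indent_size : Prop := ∀ (line : String), Dom_indent_size line → Spec_indent_size line (indent_size line)

-- ===== LEMMAS AND PROOFS =====

theorem indentLoopA_eq (cs : List Char) : ∀ (size : Int),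
    indentLoopA cs size =
      size + ((cs.takeWhile (fun c => c == ' ' || c == '\t')).count ' ' : Int)
           + ((cs.takeWhile (fun c => c == ' ' || c == '\t')).count '\t') * 8 := by
  induction cs with
  | nil => intro size; simp [indentLoopA]
  | cons c rest ih =>
    intro size
    by_cases hs : c = ' '
    · subst hs
      simp [indentLoopA, ih]
      ring
    · by_cases ht : c = '\t'
      · subst ht
        simp [indentLoopA, ih]
        ring
      · have hp : (fun c => c == ' ' || c == '\t') c = false := by
          simp [hs, ht]
        simp [indentLoopA, hp, hs, ht]

theorem take_sub_dropWhile (p : Char → Bool) (cs : List Char) :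
    cs.take (cs.length - (cs.dropWhile p).length) = cs.takeWhile p := by
  have hsplit : cs.takeWhile p ++ cs.dropWhile p = cs := List.takeWhile_append_dropWhile
  have hlen : cs.length - (cs.dropWhile p).length = (cs.takeWhile p).length := by
    have h2 : (cs.takeWhile p).length + (cs.dropWhile p).length = cs.length := by
      rw [← List.length_append, hsplit]
    omega
  have htake : (cs.takeWhile p ++ cs.dropWhile p).take (cs.takeWhile p).length
      = cs.takeWhile p := List.take_left' rfl
  rw [hsplit] at htake
  rw [hlen]
  exact htake

-- ===== VERDICT (by name: the statement is the Claim_ definition above) =====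
theorem indent_size_spec : Claim_equal_indent_size := by
  intro line _
  unfold Spec_indent_size
  simp only [indent_size, indent_size_alt]
  rw [indentLoopA_eq, take_sub_dropWhile]
  omega
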